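-- pv_equiv track=rewrite | github.com/MrBrantCode/unitest_baseline | mut_generate/mist_train_cf/cf_14621/solution.py | generate_ordered_tags
-- ===== SOURCE A (Python) =====
-- def generate_ordered_tags(tags):
--     # Create a dictionary to store the hierarchical relationships
--     relationships = {tag: [] for tag in tags}
--     result = []
--
--     # Helper function for DFS
--     def dfs(tag):
--         result.append(tag)
--         for child in relationships[tag]:
--             dfs(child)
--
--     # Build the hierarchical relationships dictionary
--     for i in range(1, len(tags)):
--         parent = tags[i - 1]
--         child = tags[i]
--         relationships[parent].append(child)
--
--     # Perform DFS starting from 'html' tag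
--     dfs('html')
--
--     return result
-- ===== SOURCE B (Python) =====
-- def generate_ordered_tags(tags):
--     # Each tag's children are exactly its successors in the list, so the DFS
--     # from the first 'html' simply replays the list from that point on: no
--     # dict, no recursion, just the suffix starting at the first 'html'.
--     return tags[tags.index('html'):]
-- ===== Notes on version B (the rewrite author's own statement) =====
-- stated objective: simpler
-- what changed: B drops the relationships dict and the recursive DFS entirely: since each tag's only children are its immediate successors in the list, the DFS from the first 'html' just replays the suffix, so B returns tags[tags.index('html'):] directly.
import Mathlib
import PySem

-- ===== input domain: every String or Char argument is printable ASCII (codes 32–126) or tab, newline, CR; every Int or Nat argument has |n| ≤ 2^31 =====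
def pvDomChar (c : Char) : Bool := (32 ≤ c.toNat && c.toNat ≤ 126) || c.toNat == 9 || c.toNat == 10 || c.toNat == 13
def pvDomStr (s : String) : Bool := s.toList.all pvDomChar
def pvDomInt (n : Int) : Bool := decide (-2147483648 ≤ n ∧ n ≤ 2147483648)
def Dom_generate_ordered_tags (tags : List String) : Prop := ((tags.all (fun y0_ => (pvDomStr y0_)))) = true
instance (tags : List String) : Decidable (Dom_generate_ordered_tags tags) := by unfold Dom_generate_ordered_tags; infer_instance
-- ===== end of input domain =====

-- B drops A's relationships dict and recursive DFS entirely: each tag's children are its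
-- immediate successors in the list, so the DFS from the first 'html' replays the suffix
-- and B returns tags[tags.index('html'):] directly (simpler; same O(n) cost).

-- ===== PORT A =====
-- relationships = {tag: [] for tag in tags}; then for i in range(1, len(tags)):
--   relationships[tags[i-1]].append(tags[i]).  (Every tags[j] is a dict key, so
-- Dict.modify with default [] is exact; pyGetD's default "" is never used: i in range.)
def pvRelA (tags : List String) : PySem.Dict String (List String) :=
  (PySem.List.pyRange 1 (tags.length : Int) 1).foldl
    (fun d i =>
      d.modify (PySem.List.pyGetD tags (i - 1) "") []
        (fun l => l ++ [PySem.List.pyGetD tags i ""]))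
    (tags.foldl (fun d t => d.insert t ([] : List String)) PySem.Dict.empty)

-- def dfs(tag): result.append(tag); for child in relationships[tag]: dfs(child)
-- Fuel tags.length always suffices inside Pre_ (the part reachable from 'html' is a
-- simple chain of distinct tags); Python's KeyError on a tag absent from the dict and
-- its RecursionError on a reachable cycle lie outside Pre_ (getD/fuel are stand-ins there).
def pvDfsA (rel : PySem.Dict String (List String)) : Nat → List String → String → List String
  | 0, res, _ => res
  | f + 1, res, tag => (rel.getD tag []).foldl (fun r c => pvDfsA rel f r c) (res ++ [tag])

def generate_ordered_tags (tags : List String) : List String :=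
  pvDfsA (pvRelA tags) tags.length [] "html"

-- ===== PORT B =====
-- return tags[tags.index('html'):]  ('html' missing raises ValueError: outside Pre_,
-- the none branch is a stand-in there)
def generate_ordered_tags_alt (tags : List String) : List String :=
  match PySem.List.index? tags "html" with
  | none => []
  | some i => PySem.List.slice tags (some (i : Int)) none

-- ===== PRECONDITION & SPEC =====
-- Pre_ is exactly the set of inputs on which A returns: A raises KeyError when 'html' is
-- missing, and RecursionError when some tag at or after the first 'html' occurs twice in
-- tags (that repetition closes a cycle in the follower graph reachable from 'html', and
-- the DFS has no visited set).  No input on which A returns a value is excluded.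
def Pre_generate_ordered_tags (tags : List String) : Prop :=
  "html" ∈ tags ∧ ∀ t ∈ tags.drop (tags.idxOf "html"), tags.count t = 1
instance (tags : List String) : Decidable (Pre_generate_ordered_tags tags) := by
  unfold Pre_generate_ordered_tags; infer_instance

def pvWitness_generate_ordered_tags : List String := ["html", "head", "body"]

def Spec_generate_ordered_tags (tags : List String) (out : List String) : Prop :=
  out = generate_ordered_tags_alt tags
instance (tags : List String) (out : List String) : Decidable (Spec_generate_ordered_tags tags out) := by
  unfold Spec_generate_ordered_tags; infer_instance

-- ===== CLAIM =====
def Claim_equal_generate_ordered_tags : Prop :=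
  ∀ (tags : List String), Dom_generate_ordered_tags tags →
    Pre_generate_ordered_tags tags →
    Spec_generate_ordered_tags tags (generate_ordered_tags tags)

-- ===== LEMMAS AND PROOFS =====

-- The index-pair list A folds over is exactly the list of consecutive pairs.
theorem pvPairsEq (tags : List String) :
    (PySem.List.pyRange 1 (tags.length : Int) 1).map
      (fun i => (PySem.List.pyGetD tags (i - 1) "", PySem.List.pyGetD tags i "")) =
    tags.zip tags.tail := by
  rw [PySem.List.pyRange_one]
  apply List.ext_getElem
  · simp [List.length_zip]
  · intro k h1 h2
    have hk : k < tags.length - 1 := by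
      simp [List.length_zip] at h2; omega
    simp only [List.getElem_map, List.getElem_range, List.getElem_zip, List.getElem_tail]
    have h1' : ((1 : Int) + (k : Int)) - 1 = ((k : Nat) : Int) := by omega
    have h2' : (1 : Int) + (k : Int) = (((k + 1 : Nat)) : Int) := by push_cast; omega
    rw [h1', h2']
    simp only [PySem.List.pyGetD_natCast]
    have g1 : tags.getD k "" = tags[k] := List.getD_eq_getElem _ _ (by omega)
    have g2 : tags.getD (k + 1) "" = tags[k + 1] := List.getD_eq_getElem _ _ (by omega)
    rw [g1, g2]

-- The initial comprehension dict looks up to [] everywhere.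
theorem pvInitGetD (l : List String) (d : PySem.Dict String (List String))
    (h : ∀ t, d.getD t [] = []) (t : String) :
    (l.foldl (fun d t => d.insert t ([] : List String)) d).getD t [] = [] := by
  induction l generalizing d with
  | nil => exact h t
  | cons a rest ih =>
    refine ih _ (fun t' => ?_)
    by_cases ht : t' = a
    · subst ht; exact PySem.Dict.getD_insert_self _ _ _ _
    · rw [PySem.Dict.getD_insert_of_ne _ _ _ ht]; exact h t'

-- Folding append-modifies over a pair list: each key collects the snds of its pairs.
theorem pvFoldModifyGetD (ps : List (String × String)) (d : PySem.Dict String (List String))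
    (t : String) :
    (ps.foldl (fun d pc => d.modify pc.1 [] (fun l => l ++ [pc.2])) d).getD t [] =
      d.getD t [] ++ (ps.filter (fun pc => pc.1 == t)).map Prod.snd := by
  induction ps generalizing d with
  | nil => simp
  | cons p rest ih =>
    simp only [List.foldl_cons, ih, List.filter_cons]
    by_cases hp : p.1 = t
    · simp only [hp, beq_self_eq_true, if_pos]
      rw [← hp, PySem.Dict.getD_modify_self]
      simp
    · have : (p.1 == t) = false := by simp [hp]
      simp only [this, Bool.false_eq_true, if_neg, not_false_eq_true]
      rw [PySem.Dict.getD_modify_of_ne _ _ _ (fun h => hp h.symm)]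

-- A's dict looks up key t to the second components of the consecutive pairs headed by t.
theorem pvRelAGetD (tags : List String) (t : String) :
    (pvRelA tags).getD t [] =
      ((tags.zip tags.tail).filter (fun pc => pc.1 == t)).map Prod.snd := by
  unfold pvRelA
  have hfold : ∀ init : PySem.Dict String (List String),
      (PySem.List.pyRange 1 ((tags.length : Int)) 1).foldl
        (fun d i => d.modify (PySem.List.pyGetD tags (i - 1) "") []
          (fun l => l ++ [PySem.List.pyGetD tags i ""])) init
    = ((PySem.List.pyRange 1 ((tags.length : Int)) 1).map
        (fun i => (PySem.List.pyGetD tags (i - 1) "", PySem.List.pyGetD tags i ""))).foldl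
        (fun d pc => d.modify pc.1 [] (fun l => l ++ [pc.2])) init := by
    intro init; rw [List.foldl_map]
  rw [hfold, pvPairsEq tags, pvFoldModifyGetD,
      pvInitGetD _ _ (fun t => by
        simp [PySem.Dict.getD, PySem.Dict.get?, PySem.Dict.empty])]
  simp

-- If t does not occur in l, no consecutive pair of l has fst t.
theorem pvFilterZipNil (l : List String) (t : String) (h : t ∉ l) :
    (l.zip l.tail).filter (fun pc => pc.1 == t) = [] := by
  induction l with
  | nil => simp
  | cons a rest ih =>
    cases rest with
    | nil => simp
    | cons b r =>
      have ha : (a == t) = false := by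
        simp only [beq_eq_false_iff_ne]; intro hat; exact h (hat ▸ List.mem_cons_self ..)
      have hrest : t ∉ b :: r := fun hm => h (List.mem_cons_of_mem _ hm)
      simpa [List.zip, ha] using ih hrest

-- A tag occurring exactly once has as followers the (at most one) element after it.
theorem pvFollowers (u w : List String) (t : String) (hu : t ∉ u) (hw : t ∉ w) :
    ((((u ++ t :: w).zip (u ++ t :: w).tail)).filter (fun pc => pc.1 == t)).map Prod.snd =
      w.take 1 := by
  induction u with
  | nil =>
    cases w with
    | nil => simp
    | cons b r =>
      have : ((t :: b :: r).zip (b :: r)).filter (fun pc => pc.1 == t)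
          = (t, b) :: ((b :: r).zip ((b :: r).tail)).filter (fun pc => pc.1 == t) := by
        simp [List.zip]
      simp only [List.nil_append]
      rw [show (t :: b :: r).tail = b :: r from rfl, this, pvFilterZipNil _ _ hw]
      simp
  | cons a u' ih =>
    have hat : (a == t) = false := by
      simp only [beq_eq_false_iff_ne]; intro he; exact hu (he ▸ List.mem_cons_self ..)
    have hu' : t ∉ u' := fun hm => hu (List.mem_cons_of_mem _ hm)
    cases hrest : u' ++ t :: w with
    | nil => simp at hrest
    | cons c cs =>
      have : (a :: u' ++ t :: w).zip ((a :: u' ++ t :: w)).tail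
          = (a, c) :: ((u' ++ t :: w).zip ((u' ++ t :: w).tail)) := by
        simp [hrest, List.zip]
      rw [this, List.filter_cons]
      simp only [hat, Bool.false_eq_true, if_neg, not_false_eq_true]
      exact ih hu'

-- From a split at a once-occurring tag, the tag is in neither part.
theorem pvCountSplit (tags u w : List String) (t : String)
    (h : tags = u ++ t :: w) (hc : tags.count t = 1) : t ∉ u ∧ t ∉ w := by
  rw [h, List.count_append, List.count_cons_self] at hc
  constructor
  · exact List.count_eq_zero.mp (by omega)
  · exact List.count_eq_zero.mp (by omega)

-- A's DFS walks the suffix chain of once-occurring tags.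
theorem pvDfsARun (tags : List String) :
    ∀ (s' : List String) (t : String) (u : List String) (fuel : Nat) (res : List String),
      tags = u ++ t :: s' → (∀ x ∈ t :: s', tags.count x = 1) → s'.length + 1 ≤ fuel →
      pvDfsA (pvRelA tags) fuel res t = res ++ t :: s' := by
  intro s'
  induction s' with
  | nil =>
    intro t u fuel res htags hcnt hfuel
    cases fuel with
    | zero => omega
    | succ f =>
      obtain ⟨hnu, hnw⟩ := pvCountSplit tags u [] t htags (hcnt t (by simp))
      have : (pvRelA tags).getD t [] = [] := by
        rw [pvRelAGetD, htags, pvFollowers u [] t hnu hnw]; rfl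
      simp [pvDfsA, this]
  | cons b s'' ih =>
    intro t u fuel res htags hcnt hfuel
    cases fuel with
    | zero => omega
    | succ f =>
      obtain ⟨hnu, hnw⟩ := pvCountSplit tags u (b :: s'') t htags (hcnt t (by simp))
      have hnext : (pvRelA tags).getD t [] = [b] := by
        rw [pvRelAGetD, htags, pvFollowers u (b :: s'') t hnu hnw]; rfl
      have htags' : tags = (u ++ [t]) ++ b :: s'' := by simp [htags]
      have hcnt' : ∀ x ∈ b :: s'', tags.count x = 1 := fun x hx =>
        hcnt x (List.mem_cons_of_mem _ hx)
      have := ih b (u ++ [t]) f (res ++ [t]) htags' hcnt'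
        (by simpa using Nat.lt_succ_iff.mp hfuel)
      simp [pvDfsA, hnext, this]

-- The first occurrence splits the list there.
theorem pvIdxOfAppend (u w : List String) (t : String) (h : t ∉ u) :
    (u ++ t :: w).idxOf t = u.length := by
  induction u with
  | nil => simp
  | cons a u' ih =>
    have hat : a ≠ t := fun he => h (he ▸ List.mem_cons_self ..)
    have h' : t ∉ u' := fun hm => h (List.mem_cons_of_mem _ hm)
    simp [hat, ih h']

-- ===== VERDICT (by name: the statements are the Claim_ definitions above) =====
theorem generate_ordered_tags_spec : Claim_equal_generate_ordered_tags := by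
  intro tags _hdom hpre
  obtain ⟨hmem, hcnt⟩ := hpre
  obtain ⟨k, hk⟩ := Option.isSome_iff_exists.mp
    ((PySem.List.index?_isSome_iff tags "html").mpr hmem)
  obtain ⟨u, s', htags, hlen, hnotin⟩ := (PySem.List.index?_eq_some_iff tags "html" k).mp hk
  have hidx : tags.idxOf "html" = u.length := by
    rw [htags]; exact pvIdxOfAppend u s' "html" hnotin
  have hdrop : tags.drop u.length = "html" :: s' := by
    rw [htags]; simp
  have hcnt' : ∀ x ∈ "html" :: s', tags.count x = 1 := by
    intro x hx; exact hcnt x (by rw [hidx, hdrop]; exact hx)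
  have hfuel : s'.length + 1 ≤ tags.length := by rw [htags]; simp
  have hB : generate_ordered_tags_alt tags = "html" :: s' := by
    unfold generate_ordered_tags_alt
    rw [hk]
    show PySem.List.slice tags (some ((k : Nat) : Int)) none = _
    rw [PySem.List.slice_from_natCast, ← hlen, hdrop]
  unfold Spec_generate_ordered_tags generate_ordered_tags
  rw [hB, pvDfsARun tags s' "html" u tags.length [] htags hcnt' hfuel]
  simp
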